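-- pv_equiv track=rewrite | github.com/LucianoCerullo77/UBUniversity | tpPython/tpClase6/desafioEncriptacion.py | fase1
-- ===== SOURCE A (Python) =====
-- vocales = "aeiouAEIOU"
--
-- def esConsonante(caracter):
--     # solo considero letras consonantes, no espacios ni puntuacion
--     return caracter.isalpha() and caracter not in vocales
--
-- def fase1(mensaje):
--     # se identifican grupos de consonantes y los invierto
--     resultado = list(mensaje)
--     i = 0
--
--     while i < len(mensaje):
--         if esConsonante(mensaje[i]):
--             # encontre el inicio de un grupo
--             inicio = i
--             while i < len(mensaje) and esConsonante(mensaje[i]):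
--                 i = i + 1
--             fin = i - 1
--
--             # invierto el grupo dentro de resultado
--             izq = inicio
--             der = fin
--             while izq < der:
--                 resultado[izq], resultado[der] = resultado[der], resultado[izq]
--                 izq = izq + 1
--                 der = der - 1
--         else:
--             i = i + 1
--
--     return "".join(resultado)
-- ===== SOURCE B (Python) =====
-- from itertools import groupby
--
-- vocales = "aeiouAEIOU"
--
-- def esConsonante(caracter):
--     return caracter.isalpha() and caracter not in vocales
--
-- def fase1(mensaje):
--     # partition into maximal runs of equal consonant-ness; reverse consonant runs
--     piezas = []
--     for esCons, grupo in groupby(mensaje, key=esConsonante):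
--         run = "".join(grupo)
--         piezas.append(run[::-1] if esCons else run)
--     return "".join(piezas)
-- ===== Notes on version B (the rewrite author's own statement) =====
-- stated objective: simpler
-- what changed: B partitions the message into maximal runs of equal consonant-ness with itertools.groupby and joins each run (reversed when it is a consonant run), replacing A's index-based scan with in-place two-pointer swapping inside a copied character list.
import Mathlib
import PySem

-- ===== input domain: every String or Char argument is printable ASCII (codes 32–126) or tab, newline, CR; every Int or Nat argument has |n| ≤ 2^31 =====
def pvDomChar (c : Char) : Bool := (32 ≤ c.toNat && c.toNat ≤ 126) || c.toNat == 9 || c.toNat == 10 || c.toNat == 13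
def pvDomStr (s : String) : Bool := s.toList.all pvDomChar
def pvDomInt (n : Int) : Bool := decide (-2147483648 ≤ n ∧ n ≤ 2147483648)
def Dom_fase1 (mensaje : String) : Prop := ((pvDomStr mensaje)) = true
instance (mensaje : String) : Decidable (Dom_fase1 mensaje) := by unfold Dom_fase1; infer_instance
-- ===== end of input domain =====

-- B reverses each maximal consonant run via a groupby-style run partition instead of
-- A's index-based in-place two-pointer swapping; objective: simpler.

-- ===== PORT A =====
-- esConsonante: isalpha and not a vowel
def esCons (c : Char) : Bool := PySem.Chars.isalpha c && !(("aeiouAEIOU".toList).contains c)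

-- inner while: advance i over the consonant run
def scanA (msg : List Char) (i : Nat) : Nat :=
  if h : i < msg.length then
    if esCons msg[i] then scanA msg (i + 1) else i
  else i
termination_by msg.length - i

-- the swap while-loop: reverse resultado[izq..der] in place
def swapA (res : List Char) (izq der : Nat) : List Char :=
  if izq < der then
    swapA ((res.set izq (res.getD der ' ')).set der (res.getD izq ' ')) (izq + 1) (der - 1)
  else res
termination_by der - izq

theorem scanA_ge (msg : List Char) (i : Nat) : i ≤ scanA msg i := by
  rw [scanA]
  split_ifs with h1 h2
  · have := scanA_ge msg (i + 1); omega
  · omega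
  · omega
termination_by msg.length - i

-- the outer while over i
def loopA (msg res : List Char) (i : Nat) : List Char :=
  if h : i < msg.length then
    if esCons msg[i] then
      loopA msg (swapA res i (scanA msg i - 1)) (scanA msg i)
    else loopA msg res (i + 1)
  else res
termination_by msg.length - i
decreasing_by
  · have h2 := scanA_ge msg (i + 1)
    have : scanA msg i = scanA msg (i + 1) := by rw [scanA]; simp [*]
    omega
  · omega

def fase1 (mensaje : String) : String :=
  String.ofList (loopA mensaje.toList mensaje.toList 0)

-- ===== PORT B =====
-- groupby(mensaje, key=esConsonante): maximal runs of equal consonant-ness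
def runsB (cs : List Char) : List Char :=
  match cs with
  | [] => []
  | c :: rest =>
    let k := esCons c
    let run := c :: rest.takeWhile (fun x => esCons x == k)
    (if k then run.reverse else run) ++ runsB (rest.dropWhile (fun x => esCons x == k))
termination_by cs.length
decreasing_by
  simp only [List.length_cons]
  have := List.length_dropWhile_le (fun x => esCons x == esCons c) rest
  omega

def fase1_alt (mensaje : String) : String := String.ofList (runsB mensaje.toList)

-- ===== PRECONDITION & SPEC =====
def Spec_fase1 (mensaje : String) (out : String) : Prop := out = fase1_alt mensaje
instance (mensaje : String) (out : String) : Decidable (Spec_fase1 mensaje out) := by unfold Spec_fase1; infer_instance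

-- ===== CLAIM (what is proved, stated in full; the proofs are below) =====
def Claim_equal_fase1 : Prop := ∀ (mensaje : String), Dom_fase1 mensaje → Spec_fase1 mensaje (fase1 mensaje)

-- ===== LEMMAS AND PROOFS =====

theorem scanA_spec (msg : List Char) (i : Nat) :
    scanA msg i = i + ((msg.drop i).takeWhile esCons).length := by
  rw [scanA]
  split_ifs with h1 h2
  · have ih := scanA_spec msg (i + 1)
    have hd : msg.drop i = msg[i] :: msg.drop (i + 1) := List.drop_eq_getElem_cons h1
    rw [ih, hd, List.takeWhile_cons, if_pos h2]
    simp; omega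
  · have hd : msg.drop i = msg[i] :: msg.drop (i + 1) := List.drop_eq_getElem_cons h1
    rw [hd, List.takeWhile_cons, if_neg h2]
    simp
  · have : msg.drop i = [] := List.drop_eq_nil_of_le (by omega)
    simp [this]
termination_by msg.length - i

theorem getD_shift (pre l : List Char) (k : Nat) (x : Char) :
    (pre ++ l).getD (pre.length + k) x = l.getD k x := by
  induction pre with
  | nil => simp
  | cons p ps ih => simpa [Nat.succ_add] using ih

theorem set_shift (pre l : List Char) (k : Nat) (x : Char) :
    (pre ++ l).set (pre.length + k) x = pre ++ l.set k x := by
  induction pre with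
  | nil => simp
  | cons p ps ih => simpa [Nat.succ_add] using ih

theorem swapA_reverse_n : ∀ (n : Nat) (mid pre post : List Char), mid.length = n →
    swapA (pre ++ mid ++ post) pre.length (pre.length + mid.length - 1) =
      pre ++ mid.reverse ++ post := by
  intro n
  induction n using Nat.strong_induction_on with
  | _ n ih =>
    intro mid pre post hlen
    match mid with
    | [] => rw [swapA]; simp
    | [c] => rw [swapA]; simp
    | c :: c₂ :: tl =>
      obtain ⟨ms, d, hrest⟩ : ∃ ms d, c₂ :: tl = ms ++ [d] := by
        rcases (c₂ :: tl).eq_nil_or_concat with h | ⟨ms, d, h⟩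
        · exact absurd h (by simp)
        · exact ⟨ms, d, by simpa [List.concat_eq_append] using h⟩
      rw [hrest]
      have hlen2 : ms.length + 2 = n := by
        have := congrArg List.length hrest
        simp at this hlen; omega
      have hL : (c :: (ms ++ [d])).length = ms.length + 2 := by simp
      rw [hL]
      have hX : pre ++ (c :: (ms ++ [d])) ++ post = pre ++ (c :: (ms ++ ([d] ++ post))) := by
        simp
      rw [hX, swapA, if_pos (by omega)]
      have e1 : pre.length + (ms.length + 2) - 1 = pre.length + (ms.length + 1) := by omega
      rw [e1]
      have g1 : (pre ++ (c :: (ms ++ ([d] ++ post)))).getD (pre.length + (ms.length + 1)) ' ' = d := by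
        rw [getD_shift]
        show (ms ++ ([d] ++ post)).getD (ms.length + 0) ' ' = d
        rw [getD_shift]
        rfl
      have g2 : (pre ++ (c :: (ms ++ ([d] ++ post)))).getD pre.length ' ' = c := by
        rw [← Nat.add_zero pre.length, getD_shift]
        rfl
      rw [g1, g2]
      have s1 : (pre ++ (c :: (ms ++ ([d] ++ post)))).set pre.length d
          = pre ++ (d :: (ms ++ ([d] ++ post))) := by
        rw [← Nat.add_zero pre.length, set_shift]
        rfl
      rw [s1]
      have s2 : (pre ++ (d :: (ms ++ ([d] ++ post)))).set (pre.length + (ms.length + 1)) c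
          = pre ++ (d :: (ms ++ ([c] ++ post))) := by
        rw [set_shift, List.set_cons_succ]
        show pre ++ (d :: (ms ++ ([d] ++ post)).set (ms.length + 0) c) = _
        rw [set_shift]
        rfl
      rw [s2]
      have hX2 : pre ++ (d :: (ms ++ ([c] ++ post))) = (pre ++ [d]) ++ ms ++ (c :: post) := by
        simp
      have e2 : pre.length + 1 = (pre ++ [d]).length := by simp
      have e3 : pre.length + (ms.length + 1) - 1 = (pre ++ [d]).length + ms.length - 1 := by
        simp
      rw [hX2, e2, e3, ih ms.length (by omega) ms (pre ++ [d]) (c :: post) rfl]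
      simp

theorem swapA_reverse (mid pre post : List Char) :
    swapA (pre ++ mid ++ post) pre.length (pre.length + mid.length - 1) =
      pre ++ mid.reverse ++ post :=
  swapA_reverse_n mid.length mid pre post rfl

theorem runsB_cons_not (c : Char) (rest : List Char) (hc : esCons c = false) :
    runsB (c :: rest) = c :: runsB rest := by
  rw [runsB]
  simp only [hc, if_neg Bool.false_ne_true]
  match rest with
  | [] => simp [runsB]
  | c₂ :: tl =>
    by_cases h2 : esCons c₂
    · rw [List.takeWhile_cons, List.dropWhile_cons]
      simp [h2]
    · rw [runsB]
      simp only [List.takeWhile_cons, List.dropWhile_cons]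
      simp [h2]

theorem dropWhile_eq_drop (p : Char → Bool) (l : List Char) :
    l.dropWhile p = l.drop (l.takeWhile p).length := by
  induction l with
  | nil => simp
  | cons a tl ih =>
    by_cases h : p a
    · simp [List.dropWhile_cons, List.takeWhile_cons, h, ih]
    · simp [List.dropWhile_cons, List.takeWhile_cons, h]

theorem loopA_eq (msg : List Char) : ∀ (res : List Char) (i : Nat),
    res.length = msg.length → res.drop i = msg.drop i →
    loopA msg res i = res.take i ++ runsB (msg.drop i) := by
  intro res i hlen hsuf
  rw [loopA]
  split_ifs with h1 h2
  · -- consonant run at i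
    set t := (msg.drop i).takeWhile esCons with ht
    have hj : scanA msg i = i + t.length := scanA_spec msg i
    have htpre : t <+: msg.drop i := List.takeWhile_prefix esCons
    have htlen : t.length ≤ msg.length - i := by
      have := htpre.length_le; simp at this; omega
    have htpos : 1 ≤ t.length := by
      have hd : msg.drop i = msg[i] :: msg.drop (i + 1) := List.drop_eq_getElem_cons h1
      rw [ht, hd, List.takeWhile_cons, if_pos h2]
      simp
    have hjle : scanA msg i ≤ msg.length := by omega
    -- decompose res
    have hresdec : res = res.take i ++ t ++ res.drop (scanA msg i) := by
      have h3 : (res.drop i).take t.length = t := by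
        rw [hsuf]
        exact (List.prefix_iff_eq_take.mp htpre).symm
      calc res = res.take i ++ res.drop i := by simp
        _ = res.take i ++ ((res.drop i).take t.length ++ (res.drop i).drop t.length) := by
              simp
        _ = res.take i ++ t ++ res.drop (scanA msg i) := by
              rw [h3, List.drop_drop, List.append_assoc, hj, Nat.add_comm]
      

    have htake : (res.take i).length = i := by
      rw [List.length_take]; omega
    have hswap : swapA res i (scanA msg i - 1) =
        res.take i ++ t.reverse ++ res.drop (scanA msg i) := by
      conv_lhs => rw [hresdec]
      have h := swapA_reverse t (res.take i) (res.drop (scanA msg i))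
      rw [htake] at h
      have he : i + t.length - 1 = scanA msg i - 1 := by omega
      rw [he] at h
      exact h
    rw [hswap]
    -- recursive call
    have hlen' : (res.take i ++ t.reverse ++ res.drop (scanA msg i)).length = msg.length := by
      simp [htake]
      omega
    have hdropres : res.drop (scanA msg i) = msg.drop (scanA msg i) := by
      rw [hj, ← List.drop_drop, ← List.drop_drop, hsuf]
    have hsuf' : (res.take i ++ t.reverse ++ res.drop (scanA msg i)).drop (scanA msg i)
        = msg.drop (scanA msg i) := by
      rw [List.append_assoc, List.drop_append, htake]
      have h4 : scanA msg i - i = t.length := by omega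
      rw [h4, List.drop_append]
      have z1 : (res.take i).drop (scanA msg i) = [] :=
        List.drop_eq_nil_of_le (by rw [htake]; omega)
      have z2 : t.reverse.drop t.length = [] := List.drop_eq_nil_of_le (by simp)
      rw [z1, z2, hdropres]
      simp
    rw [loopA_eq msg (res.take i ++ t.reverse ++ res.drop (scanA msg i)) (scanA msg i) hlen' hsuf']
    have htake' : (res.take i ++ t.reverse ++ res.drop (scanA msg i)).take (scanA msg i)
        = res.take i ++ t.reverse := by
      have hL : (res.take i ++ t.reverse).length = i + t.length := by simp [htake]
      rw [List.take_append, hL]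
      have y3 : scanA msg i - (i + t.length) = 0 := by omega
      rw [y3, List.take_zero, List.append_nil]
      exact List.take_of_length_le (by rw [hL]; omega)
    rw [htake']
    -- runsB on the consonant run
    have hrun : runsB (msg.drop i) = t.reverse ++ runsB (msg.drop (scanA msg i)) := by
      have hd : msg.drop i = msg[i] :: msg.drop (i + 1) := List.drop_eq_getElem_cons h1
      rw [hd, runsB]
      simp only [h2, if_pos]
      have hpred : (fun x => esCons x == true) = esCons := by
        funext x; simp
      rw [hpred]
      have h5 : msg[i] :: (msg.drop (i+1)).takeWhile esCons = t := by
        rw [ht, hd, List.takeWhile_cons, if_pos h2]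
      have h6 : (msg.drop (i+1)).dropWhile esCons = msg.drop (scanA msg i) := by
        have h7 : ((msg.drop (i+1)).takeWhile esCons).length = t.length - 1 := by
          rw [← h5]; simp
        rw [dropWhile_eq_drop esCons (msg.drop (i+1)), h7, List.drop_drop, hj]
        congr 1
        omega
      rw [h5, h6]
    rw [hrun]
    simp
  · -- not a consonant at i
    have hd : msg.drop i = msg[i] :: msg.drop (i + 1) := List.drop_eq_getElem_cons h1
    have hsuf' : res.drop (i + 1) = msg.drop (i + 1) := by
      rw [← List.drop_drop, ← List.drop_drop, hsuf]
    rw [loopA_eq msg res (i + 1) hlen hsuf']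
    have hri : res[i]? = some msg[i] := by
      have h9 : (res.drop i)[0]? = (msg.drop i)[0]? := by rw [hsuf]
      rw [List.getElem?_drop, List.getElem?_drop] at h9
      simpa [List.getElem?_eq_getElem h1] using h9
    rw [hd, runsB_cons_not _ _ (by simpa using h2)]
    rw [List.take_add_one, hri]
    simp
  · -- i ≥ len: loop ends
    have hd : msg.drop i = [] := List.drop_eq_nil_of_le (by omega)
    rw [hd]
    show res = res.take i ++ runsB []
    rw [runsB]
    rw [List.take_of_length_le (by omega)]
    simp
termination_by res i => msg.length - i
decreasing_by
  · have := scanA_ge msg (i + 1)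
    have h10 : scanA msg i = scanA msg (i + 1) := by rw [scanA]; simp [*]
    omega
  · omega

-- ===== VERDICT (by name: the statement is the Claim_ definition above) =====
theorem fase1_spec : Claim_equal_fase1 := by
  intro mensaje _
  unfold Spec_fase1 fase1 fase1_alt
  rw [loopA_eq mensaje.toList mensaje.toList 0 rfl rfl]
  simp
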